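-- pv_equiv track=rewrite | github.com/liamb0t/Advent-of-Code-2022 | day9/rope_bridge.py | move_head
-- ===== SOURCE A (Python) =====
-- def move_head(head, dir, moves):
--     path = []
--     dirs = {'R': 1, 'L': -1, 'U': -1, 'D': 1}
--     hx, hy = head[0], head[1]
--     for i in range(moves):
--         if dir in ['R', 'L']:
--             hy += dirs[dir]
--         elif dir in ['U', 'D']:
--             hx += dirs[dir]
--         path.append((hx, hy))
--     return path
-- ===== SOURCE B (Python) =====
-- def move_head(head, dir, moves):
--     dx, dy = {'R': (0, 1), 'L': (0, -1), 'U': (-1, 0), 'D': (1, 0)}.get(dir, (0, 0))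
--     hx, hy = head[0], head[1]
--     return [(hx + dx * (i + 1), hy + dy * (i + 1)) for i in range(moves)]
-- ===== Notes on version B (the rewrite author's own statement) =====
-- stated objective: simpler
-- what changed: B replaces A's per-step accumulator loop with branches inside it by a single dict lookup of a (dx,dy) delta and a closed-form per-index computation of each absolute position.
import Mathlib
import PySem

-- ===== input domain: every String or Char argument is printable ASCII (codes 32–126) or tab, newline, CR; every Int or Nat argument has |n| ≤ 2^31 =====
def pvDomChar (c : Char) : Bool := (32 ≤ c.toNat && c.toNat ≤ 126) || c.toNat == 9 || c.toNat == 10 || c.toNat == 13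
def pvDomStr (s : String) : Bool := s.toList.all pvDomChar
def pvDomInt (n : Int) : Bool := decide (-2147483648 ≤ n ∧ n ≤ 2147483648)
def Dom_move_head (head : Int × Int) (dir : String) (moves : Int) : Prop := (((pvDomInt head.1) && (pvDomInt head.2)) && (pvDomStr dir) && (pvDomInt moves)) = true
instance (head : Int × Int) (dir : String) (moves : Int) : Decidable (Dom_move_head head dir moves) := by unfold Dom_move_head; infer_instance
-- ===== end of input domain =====

-- B replaces A's per-step accumulator loop (with the direction branch inside it) by one dict
-- lookup of a (dx,dy) delta and a closed-form per-index computation; same O(n) cost, simpler.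

-- ===== PORT A =====
-- dirs[dir] is only evaluated under a branch guaranteeing membership; ported as get? ... getD 0.
def move_head (head : Int × Int) (dir : String) (moves : Int) : List (Int × Int) :=
  let dirs : PySem.Dict String Int :=
    PySem.Dict.ofList [("R", 1), ("L", -1), ("U", -1), ("D", 1)]
  ((PySem.List.pyRange 0 moves 1).foldl
    (fun (st : (Int × Int) × List (Int × Int)) _ =>
      let pos' : Int × Int :=
        if dir == "R" || dir == "L" then (st.1.1, st.1.2 + (dirs.get? dir).getD 0)
        else if dir == "U" || dir == "D" then (st.1.1 + (dirs.get? dir).getD 0, st.1.2)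
        else (st.1.1, st.1.2)
      (pos', st.2 ++ [pos']))
    ((head.1, head.2), [])).2

-- ===== PORT B =====
def move_head_alt (head : Int × Int) (dir : String) (moves : Int) : List (Int × Int) :=
  let deltas : PySem.Dict String (Int × Int) :=
    PySem.Dict.ofList [("R", (0, 1)), ("L", (0, -1)), ("U", (-1, 0)), ("D", (1, 0))]
  let d : Int × Int := deltas.getD dir (0, 0)
  (PySem.List.pyRange 0 moves 1).map
    (fun i => (head.1 + d.1 * (i + 1), head.2 + d.2 * (i + 1)))

-- ===== PRECONDITION & SPEC =====
def Spec_move_head (head : Int × Int) (dir : String) (moves : Int) (out : List (Int × Int)) : Prop := out = move_head_alt head dir moves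
instance (head : Int × Int) (dir : String) (moves : Int) (out : List (Int × Int)) : Decidable (Spec_move_head head dir moves out) := by unfold Spec_move_head; infer_instance

-- ===== CLAIM (what is proved, stated in full; the proofs are below) =====
def Claim_equal_move_head : Prop := ∀ (head : Int × Int) (dir : String) (moves : Int), Dom_move_head head dir moves → Spec_move_head head dir moves (move_head head dir moves)

-- ===== LEMMAS AND PROOFS =====

-- A's loop with a constant per-step delta (dx, dy) computes the closed form.
theorem foldA (dx dy : Int) : ∀ (n : Nat) (pos : Int × Int) (p : List (Int × Int)),
    (List.range n).foldl
      (fun (st : (Int × Int) × List (Int × Int)) (_ : Nat) =>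
        ((st.1.1 + dx, st.1.2 + dy), st.2 ++ [(st.1.1 + dx, st.1.2 + dy)])) (pos, p)
    = ((pos.1 + dx * n, pos.2 + dy * n),
       p ++ (List.range n).map (fun k : Nat => (pos.1 + dx * ((k : Int) + 1), pos.2 + dy * ((k : Int) + 1)))) := by
  intro n
  induction n with
  | zero => intro pos p; simp
  | succ n ih =>
    intro pos p
    rw [List.range_succ, List.foldl_append, List.map_append, ih]
    simp only [List.foldl_cons, List.foldl_nil, List.map_cons, List.map_nil]
    push_cast
    refine Prod.ext (Prod.ext ?_ ?_) ?_
    · simp; ring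
    · simp; ring
    · simp; constructor <;> ring

-- rewrite a fold over pyRange 0 n 1 (element ignored) into a fold over List.range
theorem fold_pyRange_range {β : Type} (n : Int) (f : β → Int → β) (init : β) :
    (PySem.List.pyRange 0 n 1).foldl f init
    = (List.range n.toNat).foldl (fun b (k : Nat) => f b ((0 : Int) + k)) init := by
  rw [PySem.List.pyRange_one, List.foldl_map]
  simp

theorem map_pyRange_range {β : Type} (n : Int) (f : Int → β) :
    (PySem.List.pyRange 0 n 1).map f
    = (List.range n.toNat).map (fun k : Nat => f ((0 : Int) + k)) := by
  rw [PySem.List.pyRange_one, List.map_map]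
  simp [Function.comp]

theorem move_head_case (head : Int × Int) (dir : String) (moves : Int) (dx dy : Int)
    (hstep : ∀ (st : (Int × Int) × List (Int × Int)),
      (if dir == "R" || dir == "L" then
          (st.1.1, st.1.2 + (((PySem.Dict.ofList [("R", (1:Int)), ("L", -1), ("U", -1), ("D", 1)]).get? dir).getD 0))
        else if dir == "U" || dir == "D" then
          (st.1.1 + (((PySem.Dict.ofList [("R", (1:Int)), ("L", -1), ("U", -1), ("D", 1)]).get? dir).getD 0), st.1.2)
        else (st.1.1, st.1.2))
      = (st.1.1 + dx, st.1.2 + dy))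
    (hdelta : (PySem.Dict.ofList [("R", ((0:Int), (1:Int))), ("L", (0, -1)), ("U", (-1, 0)), ("D", (1, 0))]).getD dir (0, 0) = (dx, dy)) :
    move_head head dir moves = move_head_alt head dir moves := by
  unfold move_head move_head_alt
  simp only [hdelta]
  rw [fold_pyRange_range]
  have hfun : (fun (st : (Int × Int) × List (Int × Int)) (k : Nat) =>
      (fun (st : (Int × Int) × List (Int × Int)) (_ : Int) =>
        let pos' : Int × Int :=
          if dir == "R" || dir == "L" then
            (st.1.1, st.1.2 + (((PySem.Dict.ofList [("R", (1:Int)), ("L", -1), ("U", -1), ("D", 1)]).get? dir).getD 0))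
          else if dir == "U" || dir == "D" then
            (st.1.1 + (((PySem.Dict.ofList [("R", (1:Int)), ("L", -1), ("U", -1), ("D", 1)]).get? dir).getD 0), st.1.2)
          else (st.1.1, st.1.2)
        (pos', st.2 ++ [pos'])) st ((0 : Int) + k))
      = (fun (st : (Int × Int) × List (Int × Int)) (_ : Nat) =>
        ((st.1.1 + dx, st.1.2 + dy), st.2 ++ [(st.1.1 + dx, st.1.2 + dy)])) := by
    funext st k
    simp only [hstep st]
  rw [show ((head.1, head.2) : Int × Int) = head from rfl]
  rw [hfun, foldA dx dy moves.toNat head [], map_pyRange_range]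
  simp [add_comm]

-- ===== VERDICT (by name: the statement is the Claim_ definition above) =====
theorem move_head_spec : Claim_equal_move_head := by
  intro head dir moves _
  unfold Spec_move_head
  by_cases hR : dir = "R"
  · subst hR
    exact (move_head_case head "R" moves 0 1 (fun st => by simp [show ((PySem.Dict.ofList [("R", (1:Int)), ("L", -1), ("U", -1), ("D", 1)]).get? "R").getD 0 = 1 from by decide]) (by decide))
  · by_cases hL : dir = "L"
    · subst hL
      exact (move_head_case head "L" moves 0 (-1) (fun st => by simp [show ((PySem.Dict.ofList [("R", (1:Int)), ("L", -1), ("U", -1), ("D", 1)]).get? "L").getD 0 = -1 from by decide]) (by decide))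
    · by_cases hU : dir = "U"
      · subst hU
        exact (move_head_case head "U" moves (-1) 0 (fun st => by simp [show ((PySem.Dict.ofList [("R", (1:Int)), ("L", -1), ("U", -1), ("D", 1)]).get? "U").getD 0 = -1 from by decide]) (by decide))
      · by_cases hD : dir = "D"
        · subst hD
          exact (move_head_case head "D" moves 1 0 (fun st => by simp [show ((PySem.Dict.ofList [("R", (1:Int)), ("L", -1), ("U", -1), ("D", 1)]).get? "D").getD 0 = 1 from by decide]) (by decide))
        · refine (move_head_case head dir moves 0 0 (fun st => by simp [hR, hL, hU, hD]) ?_)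
          simp [PySem.Dict.getD, PySem.Dict.ofList, PySem.Dict.update, PySem.Dict.get?, PySem.Dict.insert, PySem.Dict.empty, beq_iff_eq, Ne.symm hR, Ne.symm hL, Ne.symm hU, Ne.symm hD]
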